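-- pv_equiv track=rewrite | github.com/flavioquadros/openavem | openavem/bada.py | fixed_spacing_strings
-- ===== SOURCE A (Python) =====
-- def fixed_spacing_strings(s, fmt):
--     """
--     Return stripped substrings contained in given positions of string s
--
--     Parameters
--     ----------
--     s : str
--         String to parse.
--     fmt : list of int
--         Alternating gaps and lengths, starting with a gap.
--
--     Raises
--     ------
--     ValueError
--         If len(fmt) < 2.
--
--     Returns
--     -------
--     values : list of str
--         Extracted values.
--
--     """
--     if len(fmt) < 2:
--         raise ValueError('fmt must have length >= 2')
--
--     values = []
--     pos = 0
--     for i in range(int(len(fmt)/2)):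
--         pos += fmt[i*2]
--         length = fmt[i*2+1]
--         value = s[pos:pos+length]
--         value = value.strip()
--         values.append(value)
--         pos += length
--
--     return values
-- ===== SOURCE B (Python) =====
-- from itertools import accumulate
--
-- def fixed_spacing_strings(s, fmt):
--     if len(fmt) < 2:
--         raise ValueError('fmt must have length >= 2')
--     cum = list(accumulate(fmt))
--     return [s[cum[2*i]:cum[2*i+1]].strip() for i in range(len(fmt)//2)]
-- ===== Notes on version B (the rewrite author's own statement) =====
-- stated objective: simpler
-- what changed: B replaces the running-position accumulator loop with a prefix-sum table (itertools.accumulate) and a single comprehension slicing at cum[2i]:cum[2i+1].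
import Mathlib
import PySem

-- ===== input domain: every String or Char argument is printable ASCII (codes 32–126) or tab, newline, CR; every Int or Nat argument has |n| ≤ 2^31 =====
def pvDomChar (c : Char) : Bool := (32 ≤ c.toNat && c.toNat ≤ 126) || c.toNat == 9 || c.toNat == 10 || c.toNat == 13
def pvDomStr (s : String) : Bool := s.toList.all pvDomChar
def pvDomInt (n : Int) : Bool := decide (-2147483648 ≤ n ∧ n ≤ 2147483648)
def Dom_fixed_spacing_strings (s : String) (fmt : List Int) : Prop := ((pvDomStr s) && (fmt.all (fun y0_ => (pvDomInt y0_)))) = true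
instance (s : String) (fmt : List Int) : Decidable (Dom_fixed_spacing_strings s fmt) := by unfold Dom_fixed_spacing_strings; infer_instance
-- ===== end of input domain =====

-- B replaces A's running-position loop by a prefix-sum table and a comprehension; same cost, simpler.

-- ===== PORT A =====
-- A's loop: pos accumulates gap then length; each field is s[pos:pos+length].strip().
def fixed_spacing_strings (s : String) (fmt : List Int) : List String :=
  if fmt.length < 2 then []   -- Python raises ValueError here; excluded by Pre_
  else
    ((PySem.List.pyRange 0 ((fmt.length / 2 : Nat) : Int) 1).foldl
      (fun (st : List String × Int) i =>
        let pos := st.2 + PySem.List.pyGetD fmt (i * 2) 0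
        let length := PySem.List.pyGetD fmt (i * 2 + 1) 0
        let value := PySem.Str.strip (PySem.Str.slice s (some pos) (some (pos + length)))
        (st.1 ++ [value], pos + length))
      ([], 0)).1

-- ===== PORT B =====
-- B: cum = list(accumulate(fmt)); field i is s[cum[2i]:cum[2i+1]].strip().
def fixed_spacing_strings_alt (s : String) (fmt : List Int) : List String :=
  if fmt.length < 2 then []   -- Python raises ValueError here; excluded by Pre_
  else
    let cum := (fmt.scanl (· + ·) 0).tail
    (List.range (fmt.length / 2)).map (fun i =>
      PySem.Str.strip (PySem.Str.slice s (some (cum.getD (2 * i) 0)) (some (cum.getD (2 * i + 1) 0))))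

-- ===== PRECONDITION & SPEC =====
-- Pre_ excludes fmt with fewer than 2 entries, on which A raises ValueError.
def Pre_fixed_spacing_strings (s : String) (fmt : List Int) : Prop := 2 ≤ fmt.length
instance (s : String) (fmt : List Int) : Decidable (Pre_fixed_spacing_strings s fmt) := by unfold Pre_fixed_spacing_strings; infer_instance
def pvWitness_fixed_spacing_strings : String × List Int := (" ab ", [0, 3])

def Spec_fixed_spacing_strings (s : String) (fmt : List Int) (out : List String) : Prop := out = fixed_spacing_strings_alt s fmt
instance (s : String) (fmt : List Int) (out : List String) : Decidable (Spec_fixed_spacing_strings s fmt out) := by unfold Spec_fixed_spacing_strings; infer_instance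

-- ===== CLAIM (what is proved, stated in full; the proofs are below) =====
def Claim_equal_fixed_spacing_strings : Prop := ∀ (s : String) (fmt : List Int), Dom_fixed_spacing_strings s fmt → Pre_fixed_spacing_strings s fmt → Spec_fixed_spacing_strings s fmt (fixed_spacing_strings s fmt)

-- ===== LEMMAS AND PROOFS =====

-- scanl of addition lists the prefix sums.
theorem pv_scanl_sum (fmt : List Int) (a : Int) (k : Nat) (hk : k ≤ fmt.length) :
    (fmt.scanl (· + ·) a)[k]? = some (a + (fmt.take k).sum) := by
  induction fmt generalizing a k with
  | nil => simp at hk; simp [hk, List.scanl]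
  | cons x xs ih =>
    cases k with
    | zero => simp [List.scanl]
    | succ k =>
      rw [List.scanl_cons, List.getElem?_cons_succ,
        ih (a + x) k (by simpa using hk)]
      simp [add_assoc]

-- cum = tail of the scanl: cum[k] = sum of the first k+1 entries.
theorem pv_cum_getD (fmt : List Int) (k : Nat) (hk : k < fmt.length) :
    ((fmt.scanl (· + ·) 0).tail).getD k 0 = (fmt.take (k + 1)).sum := by
  have h := pv_scanl_sum fmt 0 (k + 1) (by omega)
  rw [List.getD_eq_getElem?_getD, List.getElem?_tail, h]
  simp

theorem pv_take_succ_sum (fmt : List Int) (k : Nat) (hk : k < fmt.length) :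
    (fmt.take (k + 1)).sum = (fmt.take k).sum + PySem.List.pyGetD fmt (k : Int) 0 := by
  rw [PySem.List.pyGetD_natCast]
  simp [List.getElem?_eq_getElem hk, List.getD_eq_getElem?_getD,
    List.sum_take_succ _ _ hk]

-- A's loop invariant, by induction on the number of fields, right to left (range n+1 = range n ++ [n]).
theorem pv_loopA (s : String) (fmt : List Int) (n : Nat) (hn : 2 * n ≤ fmt.length) :
    (List.range n).foldl
      (fun (st : List String × Int) (k : Nat) =>
        let pos := st.2 + PySem.List.pyGetD fmt ((k : Int) * 2) 0
        let length := PySem.List.pyGetD fmt ((k : Int) * 2 + 1) 0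
        let value := PySem.Str.strip (PySem.Str.slice s (some pos) (some (pos + length)))
        (st.1 ++ [value], pos + length))
      ([], 0)
    = ((List.range n).map (fun i =>
        PySem.Str.strip (PySem.Str.slice s
          (some ((fmt.take (2 * i + 1)).sum)) (some ((fmt.take (2 * i + 2)).sum)))),
       (fmt.take (2 * n)).sum) := by
  induction n with
  | zero => simp
  | succ n ih =>
    rw [List.range_succ, List.foldl_append, List.map_append, ih (by omega)]
    simp only [List.foldl_cons, List.foldl_nil, List.map_cons, List.map_nil]
    have h1 : ((n : Int) * 2) = ((2 * n : Nat) : Int) := by push_cast; ring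
    have h2 : ((n : Int) * 2 + 1) = ((2 * n + 1 : Nat) : Int) := by push_cast; ring
    rw [h2, h1]
    rw [← pv_take_succ_sum fmt (2 * n) (by omega)]
    rw [← pv_take_succ_sum fmt (2 * n + 1) (by omega)]
    have h3 : 2 * (n + 1) = 2 * n + 1 + 1 := by ring
    rw [h3]

-- ===== VERDICT (by name: the statement is the Claim_ definition above) =====
theorem fixed_spacing_strings_spec : Claim_equal_fixed_spacing_strings := by
  intro s fmt _ hpre
  unfold Spec_fixed_spacing_strings fixed_spacing_strings fixed_spacing_strings_alt
  have hlen : ¬ fmt.length < 2 := by unfold Pre_fixed_spacing_strings at hpre; omega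
  rw [if_neg hlen, if_neg hlen]
  rw [PySem.List.pyRange_zero_nat, List.foldl_map]
  rw [pv_loopA s fmt (fmt.length / 2) (by omega)]
  apply List.map_congr_left
  intro i hi
  have hi' : i < fmt.length / 2 := List.mem_range.mp hi
  rw [pv_cum_getD fmt (2 * i) (by omega), pv_cum_getD fmt (2 * i + 1) (by omega)]
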